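-- pv_equiv track=rewrite | github.com/KieferPlender/Thesis | scripts/04_analysis/bias_metrics.py | parse_winner
-- ===== SOURCE A (Python) =====
-- def parse_winner(judge_response: str) -> str:
--     """
--     Parse the judge's response to extract the winner.
--
--     Uses the LAST occurrence of [[A]]/[[B]]/[[C]] since judges often mention
--     markers during analysis before giving their final verdict.
--
--     Args:
--         judge_response: The raw judge response text
--
--     Returns:
--         'model_a', 'model_b', 'tie', or 'error'
--     """
--     last_pos = -1
--     winner = 'error'
--     for marker, result in [('[[A]]', 'model_a'), ('[[B]]', 'model_b'), ('[[C]]', 'tie')]: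
--         pos = judge_response.rfind(marker)  # rfind = last occurrence
--         if pos > last_pos:
--             last_pos = pos
--             winner = result
--     return winner
-- ===== SOURCE B (Python) =====
-- def parse_winner(judge_response: str) -> str:
--     """Single forward pass: at each position read the 5-char chunk and, if it is
--     a marker, make it the current winner; the last marker seen wins."""
--     mapping = {'[[A]]': 'model_a', '[[B]]': 'model_b', '[[C]]': 'tie'}
--     winner = 'error'
--     for i in range(len(judge_response)):
--         winner = mapping.get(judge_response[i:i+5], winner)
--     return winner
-- ===== Notes on version B (the rewrite author's own statement) =====
-- stated objective: alternative
-- what changed: Replaces three separate backward rfind scans plus position comparisons by one left-to-right pass over the string that keeps the result of the most recent marker seen (last match wins, valid because markers cannot overlap).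
import Mathlib
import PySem

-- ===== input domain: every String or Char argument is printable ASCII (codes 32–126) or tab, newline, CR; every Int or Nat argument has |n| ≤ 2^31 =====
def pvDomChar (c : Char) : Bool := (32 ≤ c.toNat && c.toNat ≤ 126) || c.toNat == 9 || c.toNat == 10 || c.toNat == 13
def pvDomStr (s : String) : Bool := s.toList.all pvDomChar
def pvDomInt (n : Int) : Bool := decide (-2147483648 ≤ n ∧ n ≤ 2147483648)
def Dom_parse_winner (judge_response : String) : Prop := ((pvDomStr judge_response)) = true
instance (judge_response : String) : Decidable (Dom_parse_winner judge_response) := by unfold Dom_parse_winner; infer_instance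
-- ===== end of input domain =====

-- B replaces A's three backward rfind scans by one forward pass keeping the last marker seen (alternative, same cost).


-- ===== PORT A =====
-- for (marker, result) in [...]: pos = judge_response.rfind(marker); if pos > last_pos: update
def parse_winner (judge_response : String) : String :=
  (([("[[A]]", "model_a"), ("[[B]]", "model_b"), ("[[C]]", "tie")] : List (String × String)).foldl
    (fun (st : Int × String) (p : String × String) =>
      let pos := PySem.Str.rfind judge_response p.1
      if pos > st.1 then (pos, p.2) else st)
    ((-1 : Int), "error")).2

-- ===== PORT B =====
-- Source B's loop over i with chunk = judge_response[i:i+5]; ported as recursion over the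
-- suffixes of the char list (the chunk at i is `take 5` of the i-th suffix), the
-- dict lookup mapping.get(chunk, winner) as the three-way chunk comparison.
def pvAltGo : List Char → String → String
  | [], w => w
  | c :: rest, w =>
      pvAltGo rest
        (if (c :: rest).take 5 = "[[A]]".toList then "model_a"
         else if (c :: rest).take 5 = "[[B]]".toList then "model_b"
         else if (c :: rest).take 5 = "[[C]]".toList then "tie"
         else w)

def parse_winner_alt (judge_response : String) : String :=
  pvAltGo judge_response.toList "error"

-- ===== PRECONDITION & SPEC =====
def Spec_parse_winner (judge_response : String) (out : String) : Prop := out = parse_winner_alt judge_response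
instance (judge_response : String) (out : String) : Decidable (Spec_parse_winner judge_response out) := by unfold Spec_parse_winner; infer_instance

-- ===== CLAIM (what is proved, stated in full; the proofs are below) =====
def Claim_equal_parse_winner : Prop := ∀ (judge_response : String), Dom_parse_winner judge_response → Spec_parse_winner judge_response (parse_winner judge_response)

-- ===== LEMMAS AND PROOFS =====

-- A's final state as a function of the three rfind positions
def pvAfold3 (pa pb pc : Int) : String :=
  if pc > (if pb > (if pa > -1 then pa else -1) then pb else if pa > -1 then pa else -1) then "tie"
  else if pb > (if pa > -1 then pa else -1) then "model_b"
  else if pa > -1 then "model_a"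
  else "error"

theorem pvIf01 (b : Prop) [Decidable b] :
    (if b then (0 : Int) else -1) = -1 ∨ (if b then (0 : Int) else -1) = 0 := by
  split_ifs <;> simp

-- B's "last marker" as an Option, later occurrences taking priority
def pvLastM : List Char → Option String
  | [] => none
  | c :: rest =>
      match pvLastM rest with
      | some r => some r
      | none =>
          if (c :: rest).take 5 = "[[A]]".toList then some "model_a"
          else if (c :: rest).take 5 = "[[B]]".toList then some "model_b"
          else if (c :: rest).take 5 = "[[C]]".toList then some "tie"
          else none

theorem pvGo_ge (sub s : List Char) : ∀ k, -1 ≤ PySem.Chars.rfind.go s sub k := by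
  intro k
  induction k with
  | zero => simp only [PySem.Chars.rfind.go]; split <;> omega
  | succ j ih => simp only [PySem.Chars.rfind.go]; split <;> omega

theorem pvGo_cons (c : Char) (l sub : List Char) :
    ∀ k, PySem.Chars.rfind.go (c :: l) sub (k + 1) =
      if PySem.Chars.rfind.go l sub k = -1 then
        (if sub.isPrefixOf (c :: l) then 0 else -1)
      else PySem.Chars.rfind.go l sub k + 1 := by
  intro k
  induction k with
  | zero =>
      simp only [PySem.Chars.rfind.go, List.drop_succ_cons, List.drop_zero]
      by_cases h : sub.isPrefixOf l = true <;> simp [h]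
  | succ j ih =>
      have h2 : PySem.Chars.rfind.go (c :: l) sub (j + 1 + 1) =
          if sub.isPrefixOf (List.drop (j + 1 + 1) (c :: l)) then ((j : Int) + 1 + 1) else
            PySem.Chars.rfind.go (c :: l) sub (j + 1) := by
        simp only [PySem.Chars.rfind.go]; split <;> simp_all
      have h3 : PySem.Chars.rfind.go l sub (j + 1) =
          if sub.isPrefixOf (List.drop (j + 1) l) then ((j : Int) + 1) else
            PySem.Chars.rfind.go l sub j := by
        simp only [PySem.Chars.rfind.go]; split <;> simp_all
      rw [h2, h3, List.drop_succ_cons]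
      by_cases hp : sub.isPrefixOf (List.drop (j + 1) l) = true
      · have : ((j : Int) + 1) ≠ -1 := by omega
        simp [hp, this]
      · simp [hp, ih]

theorem pvRfind_cons (c : Char) (l sub : List Char) :
    PySem.Chars.rfind (c :: l) sub =
      if PySem.Chars.rfind l sub = -1 then
        (if sub.isPrefixOf (c :: l) then 0 else -1)
      else PySem.Chars.rfind l sub + 1 := by
  simp only [PySem.Chars.rfind, List.length_cons]
  exact pvGo_cons c l sub l.length

theorem pvRfind_ge (l sub : List Char) : -1 ≤ PySem.Chars.rfind l sub := by
  simp only [PySem.Chars.rfind]; exact pvGo_ge sub l l.length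

set_option maxHeartbeats 2000000 in
theorem pvAfold3_shift (pa pb pc ea eb ec : Int)
    (hea : ea = -1 ∨ ea = 0) (heb : eb = -1 ∨ eb = 0) (hec : ec = -1 ∨ ec = 0)
    (hga : -1 ≤ pa) (hgb : -1 ≤ pb) (hgc : -1 ≤ pc)
    (hsome : ¬(pa = -1 ∧ pb = -1 ∧ pc = -1)) :
    pvAfold3 (if pa = -1 then ea else pa + 1) (if pb = -1 then eb else pb + 1)
      (if pc = -1 then ec else pc + 1) = pvAfold3 pa pb pc := by
  rcases hea with rfl | rfl <;> rcases heb with rfl | rfl <;> rcases hec with rfl | rfl <;>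
    simp only [pvAfold3] <;> split_ifs <;> first | rfl | omega

theorem pvAfold3_base (ea eb ec : Int)
    (hea : ea = -1 ∨ ea = 0) (heb : eb = -1 ∨ eb = 0) (hec : ec = -1 ∨ ec = 0) :
    pvAfold3 ea eb ec =
      if ea = 0 then "model_a" else if eb = 0 then "model_b" else if ec = 0 then "tie"
      else "error" := by
  simp only [pvAfold3]
  split_ifs <;> first | rfl | omega

theorem pvMain (l : List Char) :
    pvAfold3 (PySem.Chars.rfind l "[[A]]".toList) (PySem.Chars.rfind l "[[B]]".toList)
        (PySem.Chars.rfind l "[[C]]".toList) = (pvLastM l).getD "error" ∧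
    (pvLastM l = none ↔
      (PySem.Chars.rfind l "[[A]]".toList = -1 ∧ PySem.Chars.rfind l "[[B]]".toList = -1 ∧
       PySem.Chars.rfind l "[[C]]".toList = -1)) := by
  induction l with
  | nil => constructor <;> decide
  | cons c t ih =>
      rw [pvRfind_cons, pvRfind_cons, pvRfind_cons]
      set pa := PySem.Chars.rfind t "[[A]]".toList with hpa
      set pb := PySem.Chars.rfind t "[[B]]".toList with hpb
      set pc := PySem.Chars.rfind t "[[C]]".toList with hpc
      have hga := pvRfind_ge t "[[A]]".toList
      have hgb := pvRfind_ge t "[[B]]".toList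
      have hgc := pvRfind_ge t "[[C]]".toList
      rw [← hpa] at hga; rw [← hpb] at hgb; rw [← hpc] at hgc
      -- head checks: prefix ↔ take 5 equality
      have hta : "[[A]]".toList.isPrefixOf (c :: t) = true ↔ (c :: t).take 5 = "[[A]]".toList := by
        rw [List.isPrefixOf_iff_prefix, List.prefix_iff_eq_take]
        constructor <;> (intro h; exact h.symm)
      have htb : "[[B]]".toList.isPrefixOf (c :: t) = true ↔ (c :: t).take 5 = "[[B]]".toList := by
        rw [List.isPrefixOf_iff_prefix, List.prefix_iff_eq_take]
        constructor <;> (intro h; exact h.symm)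
      have htc : "[[C]]".toList.isPrefixOf (c :: t) = true ↔ (c :: t).take 5 = "[[C]]".toList := by
        rw [List.isPrefixOf_iff_prefix, List.prefix_iff_eq_take]
        constructor <;> (intro h; exact h.symm)
      rcases hm : pvLastM t with _ | r
      · -- no marker in the tail: all tail rfinds are -1
        obtain ⟨ha, hb, hc⟩ := ih.2.mp hm
        rw [if_pos ha, if_pos hb, if_pos hc]
        rw [pvAfold3_base _ _ _ (pvIf01 _) (pvIf01 _) (pvIf01 _)]
        have hlm : pvLastM (c :: t) =
            (if (c :: t).take 5 = "[[A]]".toList then some "model_a"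
             else if (c :: t).take 5 = "[[B]]".toList then some "model_b"
             else if (c :: t).take 5 = "[[C]]".toList then some "tie"
             else none) := by
          simp only [pvLastM, hm]
        rw [hlm]
        by_cases h1 : (c :: t).take 5 = "[[A]]".toList
        · have h2 : ¬ (c :: t).take 5 = "[[B]]".toList := by rw [h1]; decide
          have h3 : ¬ (c :: t).take 5 = "[[C]]".toList := by rw [h1]; decide
          constructor <;> (simp only [hta, htb, htc]; simp [h1, h2, h3])
        · by_cases h2 : (c :: t).take 5 = "[[B]]".toList
          · have h3 : ¬ (c :: t).take 5 = "[[C]]".toList := by rw [h2]; decide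
            constructor <;> (simp only [hta, htb, htc]; simp [h1, h2, h3])
          · by_cases h3 : (c :: t).take 5 = "[[C]]".toList
            · constructor <;> (simp only [hta, htb, htc]; simp [h1, h2, h3])
            · constructor <;>
                (simp only [hta, htb, htc]; simp at h1 h2 h3 ⊢ <;>
                  split_ifs <;> first | rfl | simp_all)
      · -- the tail already has a marker: shifting positions keeps A's winner
        have hne : ¬(pa = -1 ∧ pb = -1 ∧ pc = -1) := by
          intro h; rw [ih.2.mpr h] at hm; simp at hm
        have hsh := pvAfold3_shift pa pb pc
          (if "[[A]]".toList.isPrefixOf (c :: t) then 0 else -1)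
          (if "[[B]]".toList.isPrefixOf (c :: t) then 0 else -1)
          (if "[[C]]".toList.isPrefixOf (c :: t) then 0 else -1)
          (pvIf01 _) (pvIf01 _) (pvIf01 _) hga hgb hgc hne
        have hlm : pvLastM (c :: t) = some r := by simp only [pvLastM, hm]
        constructor
        · rw [hlm]
          rw [hsh]
          have := ih.1
          rw [hm] at this
          simpa using this
        · rw [hlm]
          constructor
          · intro h; simp at h
          · intro ⟨ha', hb', hc'⟩
            exfalso
            rcases (not_and_or.mp hne) with h | h
            · have : pa + 1 ≠ -1 := by omega
              rw [if_neg h] at ha'; exact this ha'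
            · rcases (not_and_or.mp h) with h2 | h2
              · have : pb + 1 ≠ -1 := by omega
                rw [if_neg h2] at hb'; exact this hb'
              · have : pc + 1 ≠ -1 := by omega
                rw [if_neg h2] at hc'; exact this hc'

theorem pvAltGo_eq (l : List Char) : ∀ w, pvAltGo l w = (pvLastM l).getD w := by
  induction l with
  | nil => intro w; rfl
  | cons c t ih =>
      intro w
      simp only [pvAltGo, pvLastM, ih]
      rcases hm : pvLastM t with _ | r
      · simp only [hm]; split_ifs <;> rfl
      · simp [hm]

theorem pvParseA_eq (s : String) :
    parse_winner s = pvAfold3 (PySem.Chars.rfind s.toList "[[A]]".toList)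
      (PySem.Chars.rfind s.toList "[[B]]".toList) (PySem.Chars.rfind s.toList "[[C]]".toList) := by
  simp only [parse_winner, pvAfold3, List.foldl, PySem.Str.rfind_eq]
  split_ifs <;> simp_all

-- ===== VERDICT (by name: the statement is the Claim_ definition above) =====
theorem parse_winner_spec : Claim_equal_parse_winner := by
  intro s _
  unfold Spec_parse_winner parse_winner_alt
  rw [pvParseA_eq, pvAltGo_eq, (pvMain s.toList).1]
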